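-- pv_equiv track=rewrite | github.com/RobbyVocke/dx_search | dx_search.py | normalize_pgm_name
-- ===== SOURCE A (Python) =====
-- def normalize_pgm_name(sysex_name):
--     buffer = list(sysex_name[:10])
--     for i in range(len(buffer)):
--         c = buffer[i]
--         if c < 32 or c > 126:
--             buffer[i] = 32
--         else:
--             buffer[i] = c & 0x7F
--     return bytes(buffer).decode('ascii', 'ignore').strip()
-- ===== SOURCE B (Python) =====
-- def normalize_pgm_name(sysex_name):
--     # Single fused pass: build the stripped name directly while scanning the
--     # first 10 values. Anything that would become a space (value < 33 or > 126)
--     # is only counted as "pending" and emitted when a later visible character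
--     # arrives, so leading and trailing spaces never enter the result; there is
--     # no intermediate buffer, no bytes/decode round-trip and no strip() call.
--     out = ''
--     pending = 0
--     for c in sysex_name[:10]:
--         if 33 <= c <= 126:
--             out += ' ' * pending + chr(c)
--             pending = 0
--         elif out:
--             pending += 1
--     return out
-- ===== Notes on version B (the rewrite author's own statement) =====
-- stated objective: alternative
-- what changed: A mutates a 10-byte buffer in place, round-trips it through bytes()/decode() and then calls strip(); B is one fused pass that builds the already-stripped name directly, counting would-be spaces in a pending counter and emitting them only when a later visible character arrives, so no intermediate buffer, no decode and no strip call exist.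
import Mathlib
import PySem

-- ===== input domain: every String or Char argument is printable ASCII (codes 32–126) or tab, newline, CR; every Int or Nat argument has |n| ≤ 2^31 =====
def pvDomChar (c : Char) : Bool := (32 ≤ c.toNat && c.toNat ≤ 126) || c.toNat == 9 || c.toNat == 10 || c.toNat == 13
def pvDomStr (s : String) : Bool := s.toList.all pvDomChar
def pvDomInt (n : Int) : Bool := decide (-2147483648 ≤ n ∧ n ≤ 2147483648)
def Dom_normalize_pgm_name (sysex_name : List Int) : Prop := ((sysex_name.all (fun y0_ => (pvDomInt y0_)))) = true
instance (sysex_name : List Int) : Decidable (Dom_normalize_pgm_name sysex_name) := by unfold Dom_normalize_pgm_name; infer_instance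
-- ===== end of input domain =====

-- B replaces A's buffer-mutation loop plus bytes()/decode()/strip() pipeline by ONE fused
-- pass that builds the stripped name directly with a pending-space counter (objective: alternative).

-- ===== PORT A =====
def normalize_pgm_name (sysex_name : List Int) : String :=
  let buffer := PySem.List.slice sysex_name none (some 10)
  let buffer :=
    (PySem.List.pyRange 0 (buffer.length : Int) 1).foldl
      (fun b i =>
        let c := PySem.List.pyGetD b i 0
        if c < 32 ∨ 126 < c then PySem.List.pySetD b i 32
        else PySem.List.pySetD b i (PySem.Int.band c 127)) buffer
  -- bytes(buffer).decode('ascii','ignore'): after the loop every entry is in 32..126, so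
  -- this step is exactly the corresponding ASCII character for each entry
  PySem.Str.strip (String.ofList (buffer.map (fun c => Char.ofNat c.toNat)))

-- ===== PORT B =====
-- single fused pass: out = stripped result so far, pending = spaces since last kept char
def normalize_pgm_name_alt (sysex_name : List Int) : String :=
  let st := (PySem.List.slice sysex_name none (some 10)).foldl
    (fun (st : List Char × Nat) c =>
      if 33 ≤ c ∧ c ≤ 126 then
        (st.1 ++ List.replicate st.2 ' ' ++ [Char.ofNat c.toNat], 0)
      else if st.1 ≠ [] then (st.1, st.2 + 1) else st)
    ([], 0)
  String.ofList st.1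

-- ===== PRECONDITION & SPEC =====
def Spec_normalize_pgm_name (sysex_name : List Int) (out : String) : Prop := out = normalize_pgm_name_alt sysex_name
instance (sysex_name : List Int) (out : String) : Decidable (Spec_normalize_pgm_name sysex_name out) := by unfold Spec_normalize_pgm_name; infer_instance

-- ===== CLAIM (what is proved, stated in full; the proofs are below) =====
def Claim_equal_normalize_pgm_name : Prop := ∀ (sysex_name : List Int), Dom_normalize_pgm_name sysex_name → Spec_normalize_pgm_name sysex_name (normalize_pgm_name sysex_name)

-- ===== LEMMAS AND PROOFS =====

-- the per-element character A's pipeline produces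
def pvToChar (c : Int) : Char := if 33 ≤ c ∧ c ≤ 126 then Char.ofNat c.toNat else ' '

-- B's fold step
def pvStep (st : List Char × Nat) (c : Int) : List Char × Nat :=
  if 33 ≤ c ∧ c ≤ 126 then
    (st.1 ++ List.replicate st.2 ' ' ++ [Char.ofNat c.toNat], 0)
  else if st.1 ≠ [] then (st.1, st.2 + 1) else st

theorem isspace_ofNat (n : Nat) (h1 : 33 ≤ n) (h2 : n ≤ 126) :
    PySem.Chars.isspace (Char.ofNat n) = false := by
  have hv : n.isValidChar := Or.inl (by omega)
  have ht : (Char.ofNat n).toNat = n := by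
    simp [Char.ofNat, Char.ofNatAux, hv]
  simp only [PySem.Chars.isspace, ht]
  simp only [Bool.or_eq_false_iff, Bool.and_eq_false_iff, decide_eq_false_iff_not]
  omega

-- A's loop: 'for i in range(len(b)): b[i] = g(b[i])' maps g over the list.
theorem foldl_set_map (g : Int → Int) :
    ∀ (xs pre : List Int),
      (PySem.List.pyRange (pre.length : Int) ((pre.length + xs.length : Nat) : Int) 1).foldl
        (fun b i => PySem.List.pySetD b i (g (PySem.List.pyGetD b i 0))) (pre ++ xs)
      = pre ++ xs.map g := by
  intro xs
  induction xs with
  | nil =>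
    intro pre
    simp [PySem.List.pyRange_one_eq_nil le_rfl]
  | cons x xs ih =>
    intro pre
    have hcons : PySem.List.pyRange (pre.length : Int) ((pre.length + (x :: xs).length : Nat) : Int) 1
        = (pre.length : Int) :: PySem.List.pyRange ((pre.length : Int) + 1) ((pre.length + (x :: xs).length : Nat) : Int) 1 := by
      apply PySem.List.pyRange_one_cons
      simp only [List.length_cons]
      push_cast
      omega
    rw [hcons]
    simp only [List.foldl_cons]
    have hget : PySem.List.pyGetD (pre ++ x :: xs) (pre.length : Int) 0 = x := by
      rw [PySem.List.pyGetD_natCast]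
      simp [List.getD]
    have hset : PySem.List.pySetD (pre ++ x :: xs) (pre.length : Int) (g x)
        = (pre ++ [g x]) ++ xs := by
      rw [PySem.List.pySetD_natCast]
      rw [List.set_append_right _ _ (le_refl pre.length)]
      simp
    rw [hget, hset]
    have hthis := ih (pre ++ [g x])
    have harg : ((pre.length : Int) + 1) = (((pre ++ [g x]).length : Nat) : Int) := by
      simp
    have hend : ((pre.length + (x :: xs).length : Nat) : Int)
        = (((pre ++ [g x]).length + xs.length : Nat) : Int) := by
      simp only [List.length_cons, List.length_append, List.length_nil]
      push_cast
      ring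
    rw [harg, hend, hthis]
    simp

-- pointwise: A's branch-then-mask byte value decodes to pvToChar
theorem char_step (c : Int) :
    Char.ofNat ((if c < 32 ∨ 126 < c then (32 : Int) else PySem.Int.band c 127).toNat)
      = pvToChar c := by
  unfold pvToChar
  by_cases h : c < 32 ∨ 126 < c
  · rw [if_pos h, if_neg (by omega)]
    decide
  · have h32 : (32 : Int) ≤ c := by omega
    have h126 : c ≤ 126 := by omega
    have hband : PySem.Int.band c 127 = c := by
      rw [PySem.Int.band_of_nonneg (by omega) (by norm_num)]
      have h127 : (127 : Int).toNat = 127 := rfl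
      rw [h127]
      have hmod : c.toNat &&& 127 = c.toNat % 128 := Nat.and_two_pow_sub_one_eq_mod c.toNat 7
      omega
    rw [if_neg h, hband]
    by_cases h33 : 33 ≤ c
    · rw [if_pos ⟨h33, h126⟩]
    · rw [if_neg (by omega)]
      have : c = 32 := by omega
      subst this
      decide

-- so A equals strip of the mapped characters
theorem portA_eq_strip (xs : List Int) :
    normalize_pgm_name xs
      = String.ofList (PySem.Chars.strip ((PySem.List.slice xs none (some 10)).map pvToChar)) := by
  unfold normalize_pgm_name
  have hstep : (fun (b : List Int) (i : Int) =>
      let c := PySem.List.pyGetD b i 0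
      if c < 32 ∨ 126 < c then PySem.List.pySetD b i 32
      else PySem.List.pySetD b i (PySem.Int.band c 127))
      = (fun (b : List Int) (i : Int) => PySem.List.pySetD b i
          ((fun c => if c < 32 ∨ 126 < c then (32 : Int) else PySem.Int.band c 127)
            (PySem.List.pyGetD b i 0))) := by
    funext b i
    by_cases h : PySem.List.pyGetD b i 0 < 32 ∨ 126 < PySem.List.pyGetD b i 0 <;> simp [h]
  have hmap := foldl_set_map
    (fun c => if c < 32 ∨ 126 < c then (32 : Int) else PySem.Int.band c 127)
    (PySem.List.slice xs none (some 10)) []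
  simp only [List.nil_append, List.length_nil, Nat.zero_add, Nat.cast_zero] at hmap
  simp only [hstep]
  rw [hmap]
  have hchars : PySem.Str.strip (String.ofList (((PySem.List.slice xs none (some 10)).map
        (fun c => if c < 32 ∨ 126 < c then (32 : Int) else PySem.Int.band c 127)).map
        (fun c => Char.ofNat c.toNat)))
      = String.ofList (PySem.Chars.strip ((PySem.List.slice xs none (some 10)).map pvToChar)) := by
    apply String.ext
    rw [PySem.Str.toList_strip]
    simp only [String.toList_ofList]
    rw [List.map_map]
    congr 1
    exact List.map_congr_left (fun c _ => char_step c)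
  exact hchars

-- rstrip over a cons whose head is not a space
theorem rstrip_cons_nonspace (a : Char) (t : List Char)
    (ha : PySem.Chars.isspace a = false) :
    PySem.Chars.rstrip (a :: t) = a :: PySem.Chars.rstrip t := by
  unfold PySem.Chars.rstrip
  rw [show (a :: t).reverse = t.reverse ++ [a] by simp]
  rw [List.dropWhile_append]
  by_cases h : (t.reverse.dropWhile PySem.Chars.isspace).isEmpty
  · rw [if_pos h]
    rw [List.isEmpty_iff] at h
    rw [h]
    simp [List.dropWhile, ha]
  · rw [if_neg h]
    simp

-- rstrip over a cons whose head is a space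
theorem rstrip_cons_space (t : List Char) :
    PySem.Chars.rstrip (' ' :: t)
      = if PySem.Chars.rstrip t = [] then [] else ' ' :: PySem.Chars.rstrip t := by
  unfold PySem.Chars.rstrip
  rw [show (' ' :: t).reverse = t.reverse ++ [' '] by simp]
  rw [List.dropWhile_append]
  by_cases h : (t.reverse.dropWhile PySem.Chars.isspace).isEmpty
  · rw [if_pos h]
    rw [List.isEmpty_iff] at h
    rw [h]
    simp [List.dropWhile]
    decide
  · rw [if_neg h]
    rw [List.isEmpty_iff] at h
    rw [if_neg (by simpa using h)]
    simp

-- main phase of B's fold: once out is nonempty, it appends exactly rstrip of the rest,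
-- preceded by the pending spaces when the rest is not all-space
theorem fold_main (ys : List Int) :
    ∀ (out : List Char) (p : Nat), out ≠ [] →
      (ys.foldl pvStep (out, p)).1
        = out ++ (if PySem.Chars.rstrip (ys.map pvToChar) = [] then []
                  else List.replicate p ' ' ++ PySem.Chars.rstrip (ys.map pvToChar)) := by
  induction ys with
  | nil =>
    intro out p _
    simp [PySem.Chars.rstrip]
  | cons c ys ih =>
    intro out p hout
    simp only [List.foldl_cons, List.map_cons]
    by_cases hc : 33 ≤ c ∧ c ≤ 126
    · have hstep : pvStep (out, p) c
          = (out ++ List.replicate p ' ' ++ [Char.ofNat c.toNat], 0) := by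
        simp [pvStep, hc]
      rw [hstep]
      have hne : out ++ List.replicate p ' ' ++ [Char.ofNat c.toNat] ≠ [] := by simp
      rw [ih _ 0 hne]
      have hhead : pvToChar c = Char.ofNat c.toNat := by simp [pvToChar, hc]
      have hns : PySem.Chars.isspace (pvToChar c) = false := by
        rw [hhead]
        have hle : c.toNat ≤ 126 := by omega
        have hge : 33 ≤ c.toNat := by omega
        exact isspace_ofNat c.toNat hge hle
      rw [rstrip_cons_nonspace _ _ hns]
      rw [if_neg (List.cons_ne_nil _ _)]
      rw [hhead]
      by_cases h : PySem.Chars.rstrip (ys.map pvToChar) = []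
      · simp [h]
      · simp [h]
    · have hstep : pvStep (out, p) c = (out, p + 1) := by
        simp [pvStep, hc, hout]
      rw [hstep]
      rw [ih _ (p + 1) hout]
      have hsp : pvToChar c = ' ' := by simp [pvToChar, hc]
      rw [hsp, rstrip_cons_space]
      by_cases h : PySem.Chars.rstrip (ys.map pvToChar) = []
      · simp [h]
      · rw [if_neg h, if_neg h, if_neg (by simp)]
        rw [List.replicate_succ']
        simp

-- full fold from the empty state computes strip of the mapped characters
theorem fold_eq_strip (ys : List Int) :
    (ys.foldl pvStep ([], 0)).1 = PySem.Chars.strip (ys.map pvToChar) := by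
  induction ys with
  | nil => simp [PySem.Chars.strip, PySem.Chars.lstrip, PySem.Chars.rstrip]
  | cons c ys ih =>
    simp only [List.foldl_cons, List.map_cons]
    by_cases hc : 33 ≤ c ∧ c ≤ 126
    · have hstep : pvStep ([], 0) c = ([Char.ofNat c.toNat], 0) := by
        simp [pvStep, hc]
      rw [hstep, fold_main _ _ 0 (by simp)]
      have hhead : pvToChar c = Char.ofNat c.toNat := by simp [pvToChar, hc]
      have hns : PySem.Chars.isspace (pvToChar c) = false := by
        rw [hhead]
        exact isspace_ofNat c.toNat (by omega) (by omega)
      unfold PySem.Chars.strip PySem.Chars.lstrip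
      rw [List.dropWhile_cons_of_neg (by simp [hns])]
      rw [rstrip_cons_nonspace _ _ hns, hhead]
      by_cases h : PySem.Chars.rstrip (ys.map pvToChar) = [] <;> simp [h]
    · have hstep : pvStep ([], 0) c = ([], 0) := by
        simp [pvStep, hc]
      rw [hstep, ih]
      have hsp : pvToChar c = ' ' := by simp [pvToChar, hc]
      unfold PySem.Chars.strip PySem.Chars.lstrip
      rw [hsp, List.dropWhile_cons_of_pos (by decide)]

-- ===== VERDICT (by name: the statement is the Claim_ definition above) =====
theorem normalize_pgm_name_spec : Claim_equal_normalize_pgm_name := by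
  intro xs _
  unfold Spec_normalize_pgm_name
  rw [portA_eq_strip]
  unfold normalize_pgm_name_alt
  have hfold : (fun (st : List Char × Nat) (c : Int) =>
      if 33 ≤ c ∧ c ≤ 126 then
        (st.1 ++ List.replicate st.2 ' ' ++ [Char.ofNat c.toNat], 0)
      else if st.1 ≠ [] then (st.1, st.2 + 1) else st) = pvStep := by
    funext st c
    simp [pvStep]
  simp only [hfold]
  rw [fold_eq_strip]
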